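-- pv_equiv track=rewrite | github.com/VeganwarsDeluxe/DeluxeTelegramBot | utils/KLineMerger.py | compile_merges
-- ===== SOURCE A (Python) =====
-- class Sequence:
--
--     def __init__(self, repeated_part: list[str], repeated_times: int, skip: int, skip_last: int):
--         self.repeated_part = repeated_part
--         self.repeated_times = repeated_times
--         self.skip = skip
--         self.skip_last = skip_last
--
--     def __str__(self):
--         if len(self.repeated_part) == 1:
--             return f"{''.join(self.repeated_part)}x{self.repeated_times}"
--         return f"{self.repeated_part}x{self.repeated_times}"
--
--     def represent(self):
--         return self.repeated_part, self.repeated_times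
--
-- def compile_merges(lines):
--     result = []
--     skip = 0
--     while skip < len(lines) - 1:
--         found, sequence = find_repeating_sequence(lines[skip:])
--         if found:
--
--             result.append((lines[:sequence.skip], 1))
--             skip = len(lines) - sequence.skip_last
--             result.append(sequence.represent())
--         else:
--             break
--     result.append((lines[skip:], 1)) if lines[skip:] else None
--     return result
--
-- def find_repeating_sequence(strings):
--     for i in range(len(strings)):
--         for j in range(len(strings)):
--             result, repeated_part, repeated_times = get_repeating_sequence(
--                 strings[i if i > 0 else None:(-j) if j > 0 else None])
--             if result:
--                 return True, Sequence(repeated_part, repeated_times, i, j)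
--     return False, None
--
-- def get_repeating_sequence(strings):
--     n = len(strings)
--
--     def is_repeating(sequence_length):
--         for i in range(0, n, sequence_length):
--             if strings[i:i + sequence_length] != strings[:sequence_length]:
--                 return False
--         return True
--
--     for sequence_length in range(1, n // 2 + 1):
--         if n % sequence_length == 0:
--             if is_repeating(sequence_length):
--                 return True, strings[:sequence_length], n // sequence_length
--
--     return False, '', 0
-- ===== SOURCE B (Python) =====
-- # Same output as A; the repeated-sequence search uses a precomputed
-- # longest-common-extension (Z) table so each period test is O(1)
-- # instead of A's chunk-by-chunk slice comparisons.
--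
-- def _z_rows(s):
--     # rows[a][d-1] = length of the longest common prefix of s[a:] and s[a+d:]
--     rows = []
--     prev = []
--     for a in range(len(s) - 1, -1, -1):
--         row = [(prev[d - 1] + 1 if d - 1 < len(prev) else 1) if s[a] == s[a + d] else 0
--                for d in range(1, len(s) - a)]
--         rows.append(row)
--         prev = row
--     rows.reverse()
--     return rows
--
--
-- def _find_rep(s):
--     m = len(s)
--     rows = _z_rows(s)
--     for i in range(m):
--         for j in range(m):
--             L = m - j - i
--             for d in range(1, L // 2 + 1):
--                 if L % d == 0 and rows[i][d - 1] >= L - d: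
--                     return s[i:i + d], L // d, i, j
--     return None
--
--
-- def compile_merges(lines):
--     n = len(lines)
--
--     def rest(skip):
--         if skip < n - 1:
--             hit = _find_rep(lines[skip:])
--             if hit is not None:
--                 part, times, i, j = hit
--                 return [(lines[:i], 1), (part, times)] + rest(n - j)
--         return [(lines[skip:], 1)] if lines[skip:] else []
--
--     return rest(0)
-- ===== Notes on version B (the rewrite author's own statement) =====
-- stated objective: alternative
-- what changed: B answers each candidate-period test with one O(1) lookup in a longest-common-extension (Z) table precomputed per search, replacing A's per-divisor chunk-by-chunk slice comparisons, and builds the result list by recursion instead of A's accumulating while-loop.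
import Mathlib
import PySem

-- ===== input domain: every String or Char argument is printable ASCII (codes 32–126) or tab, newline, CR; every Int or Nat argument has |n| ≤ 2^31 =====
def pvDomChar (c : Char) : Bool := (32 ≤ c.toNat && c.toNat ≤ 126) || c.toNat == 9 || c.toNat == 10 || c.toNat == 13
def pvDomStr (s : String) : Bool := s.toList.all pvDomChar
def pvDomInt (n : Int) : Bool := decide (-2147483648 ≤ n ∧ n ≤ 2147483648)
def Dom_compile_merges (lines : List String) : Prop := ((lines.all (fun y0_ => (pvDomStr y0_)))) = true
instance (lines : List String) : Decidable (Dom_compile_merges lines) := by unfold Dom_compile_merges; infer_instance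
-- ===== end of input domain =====

-- B replaces A's chunk-by-chunk repetition test with a precomputed longest-common-extension
-- table (one O(1) lookup per candidate period); same return value on every input.

-- ===== PORT A =====

-- `is_repeating(sequence_length)`: the early-return-False loop over range(0, n, d) is the `all`.
def isRepeatingA (t : List String) (d : Int) : Bool :=
  (PySem.List.pyRange 0 (t.length : Int) d).all
    (fun i => PySem.List.slice t (some i) (some (i + d)) == PySem.List.slice t none (some d))

-- `get_repeating_sequence`: `(True, strings[:d], n//d)` / `(False, '', 0)` is returned as
-- `some (strings[:d], n//d)` / `none` (the Bool duplicates the Option; the `''` sentinel is never read).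
def getRepeatingA (t : List String) : Option (List String × Int) :=
  (PySem.List.pyRange 1 (PySem.Int.floordiv (t.length : Int) 2 + 1) 1).findSome? (fun d =>
    if PySem.Int.mod (t.length : Int) d == 0 then
      if isRepeatingA t d then
        some (PySem.List.slice t none (some d), PySem.Int.floordiv (t.length : Int) d)
      else none
    else none)

-- `find_repeating_sequence`: `(True, Sequence(part, times, i, j))` / `(False, None)` is returned
-- as `some (part, times, i, j)` / `none` (a Sequence is just its four fields).
def findRepeatingA (s : List String) : Option (List String × Int × Int × Int) :=
  (PySem.List.pyRange 0 (s.length : Int) 1).findSome? (fun i =>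
    (PySem.List.pyRange 0 (s.length : Int) 1).findSome? (fun j =>
      match getRepeatingA (PySem.List.slice s (if 0 < i then some i else none)
          (if 0 < j then some (-j) else none)) with
      | some (part, times) => some (part, times, i, j)
      | none => none))

-- `result.append((lines[skip:], 1)) if lines[skip:] else None` after the while loop
def tailA (lines : List String) (skip : Int) (result : List (List String × Int)) :
    List (List String × Int) :=
  if PySem.List.slice lines (some skip) none ≠ [] then
    result ++ [(PySem.List.slice lines (some skip) none, 1)]
  else result

-- the while loop of `compile_merges`, with fuel; `skip` strictly increases on every iteration
-- (the found `j` is < len(lines) - skip), so fuel `lines.length + 1` never runs out.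
def loopA (lines : List String) : Nat → Int → List (List String × Int) → List (List String × Int)
  | 0, skip, result => tailA lines skip result
  | fuel + 1, skip, result =>
    if skip < (lines.length : Int) - 1 then
      match findRepeatingA (PySem.List.slice lines (some skip) none) with
      | some (part, times, i, j) =>
          loopA lines fuel ((lines.length : Int) - j)
            (result ++ [(PySem.List.slice lines none (some i), 1), (part, times)])
      | none => tailA lines skip result
    else tailA lines skip result

def compile_merges (lines : List String) : List (List String × Int) :=
  loopA lines (lines.length + 1) 0 []

-- ===== PORT B =====

-- `_z_rows`: the backward loop producing one row per suffix becomes structural recursion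
-- (the row of `x :: u` is computed from the row of `u`, exactly as the Python computes
-- row a from row a+1; `rows.reverse()` is the cons order).
def zRowsB (s : List String) : List (List Nat) :=
  match s with
  | [] => []
  | x :: u =>
      (List.zipWith (fun y p => if x == y then p + 1 else 0) u ((zRowsB u).headD [] ++ [0]))
        :: zRowsB u

-- `_find_rep`; `rows[i][d-1]` is always in range when read, so `getD` is exact.
def findRepB (s : List String) : Option (List String × Int × Int × Int) :=
  let rows := zRowsB s
  (PySem.List.pyRange 0 (s.length : Int) 1).findSome? (fun i =>
    (PySem.List.pyRange 0 (s.length : Int) 1).findSome? (fun j =>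
      let L : Int := (s.length : Int) - j - i
      (PySem.List.pyRange 1 (PySem.Int.floordiv L 2 + 1) 1).findSome? (fun d =>
        if PySem.Int.mod L d == 0 &&
            decide (L - d ≤ (((rows.getD i.toNat []).getD (d - 1).toNat 0 : Nat) : Int)) then
          some (PySem.List.slice s (some i) (some (i + d)), PySem.Int.floordiv L d, i, j)
        else none)))

-- `[(lines[skip:], 1)] if lines[skip:] else []`
def tailB (lines : List String) (skip : Int) : List (List String × Int) :=
  if PySem.List.slice lines (some skip) none ≠ [] then
    [(PySem.List.slice lines (some skip) none, 1)]
  else []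

-- `rest(skip)` builds the result list front-to-back by recursion (fuel as in loopA).
def restB (lines : List String) : Nat → Int → List (List String × Int)
  | 0, skip => tailB lines skip
  | fuel + 1, skip =>
    if skip < (lines.length : Int) - 1 then
      match findRepB (PySem.List.slice lines (some skip) none) with
      | some (part, times, i, j) =>
          [(PySem.List.slice lines none (some i), 1), (part, times)] ++
            restB lines fuel ((lines.length : Int) - j)
      | none => tailB lines skip
    else tailB lines skip

def compile_merges_alt (lines : List String) : List (List String × Int) :=
  restB lines (lines.length + 1) 0

-- ===== PRECONDITION & SPEC =====
def Spec_compile_merges (lines : List String) (out : List (List String × Int)) : Prop := out = compile_merges_alt lines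
instance (lines : List String) (out : List (List String × Int)) : Decidable (Spec_compile_merges lines out) := by unfold Spec_compile_merges; infer_instance

-- ===== CLAIM (what is proved, stated in full; the proofs are below) =====
def Claim_equal_compile_merges : Prop := ∀ (lines : List String), Dom_compile_merges lines → Spec_compile_merges lines (compile_merges lines)

-- ===== LEMMAS AND PROOFS =====

-- length of the longest common prefix of two lists of strings
def lcpLen : List String → List String → Nat
  | a :: as, b :: bs => if a == b then lcpLen as bs + 1 else 0
  | _, _ => 0

theorem lcpLen_nil_right (u : List String) : lcpLen u [] = 0 := by
  cases u <;> rfl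

theorem headD_eq_getD {α : Type} (l : List α) (d : α) : l.headD d = l.getD 0 d := by
  cases l <;> rfl

-- every row of zRowsB has the expected length
theorem zRowsB_length (s : List String) :
    ∀ i, ((zRowsB s).getD i []).length = s.length - i - 1 := by
  induction s with
  | nil => intro i; simp [zRowsB]
  | cons x u ih =>
    intro i
    cases i with
    | zero =>
        have h0 := ih 0
        simp only [zRowsB, List.getD_cons_zero, List.length_zipWith, List.length_append,
          List.length_cons, List.length_nil]
        rw [headD_eq_getD, h0]
        omega
    | succ i => simpa [zRowsB] using ih i

-- zRowsB computes longest common extensions: row i, entry d-1 is the length of the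
-- longest common prefix of s[i:] and s[i+d:]
theorem zRowsB_spec (s : List String) :
    ∀ i k, ((zRowsB s).getD i []).getD k 0 = lcpLen (s.drop i) (s.drop (i + k + 1)) := by
  induction s with
  | nil => intro i k; simp [zRowsB, lcpLen]
  | cons x u ih =>
    intro i k
    cases i with
    | succ i =>
        have := ih i k
        simpa [zRowsB, show i + 1 + k = i + k + 1 by omega] using this
    | zero =>
        simp only [zRowsB, List.getD_cons_zero, List.drop_zero, Nat.zero_add, List.drop_succ_cons]
        by_cases hk : k < u.length
        · have hplen : ((zRowsB u).headD []).length = u.length - 1 := by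
            rw [headD_eq_getD]
            have := zRowsB_length u 0
            omega
          have hlen : ((zRowsB u).headD [] ++ [0]).length = u.length := by
            rw [List.length_append, hplen]
            simp
            omega
          have hzk : k < (List.zipWith (fun y p => if x == y then p + 1 else 0) u
              ((zRowsB u).headD [] ++ [0])).length := by
            rw [List.length_zipWith, hlen]
            omega
          rw [List.getD_eq_getElem _ _ hzk]
          rw [List.getElem_zipWith]
          have hdropk : u.drop k = u[k] :: u.drop (k + 1) := List.drop_eq_getElem_cons hk
          rw [hdropk]
          simp only [lcpLen]
          have hmem : ((zRowsB u).headD []).getD k 0 = lcpLen u (u.drop (k + 1)) := by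
            rw [headD_eq_getD]
            simpa using ih 0 k
          have hprev : ((zRowsB u).headD [] ++ [0])[k]'(by omega) = lcpLen u (u.drop (k + 1)) := by
            by_cases hk1 : k < u.length - 1
            · rw [List.getElem_append_left (by omega)]
              rw [← List.getD_eq_getElem _ 0 (by omega)]
              exact hmem
            · have hke : k = u.length - 1 := by omega
              rw [List.getElem_append_right (by omega)]
              have hnil : u.drop (k + 1) = [] := by
                apply List.drop_eq_nil_of_le; omega
              rw [hnil, lcpLen_nil_right]
              simp
          rw [hprev]
        · have h1 : (List.zipWith (fun y p => if x == y then p + 1 else 0) u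
              ((zRowsB u).headD [] ++ [0])).length ≤ k := by
            simp [List.length_zipWith]; omega
          rw [List.getD_eq_default _ _ (by omega)]
          have : u.drop k = [] := List.drop_eq_nil_of_le (by omega)
          rw [this, lcpLen_nil_right]

-- lcpLen measures agreement of prefixes
theorem lcpLen_ge_iff (c : Nat) : ∀ (u v : List String), c ≤ u.length → c ≤ v.length →
    (c ≤ lcpLen u v ↔ u.take c = v.take c) := by
  induction c with
  | zero => intro u v _ _; simp
  | succ c ih =>
    intro u v hu hv
    cases u with
    | nil => simp at hu
    | cons a as =>
      cases v with
      | nil => simp at hv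
      | cons b bs =>
        simp only [lcpLen, List.take_succ_cons]
        by_cases hab : a = b
        · subst hab
          simp only [BEq.rfl, if_pos, List.cons.injEq, true_and]
          rw [Nat.succ_le_succ_iff]
          exact ih as bs (by simpa using hu) (by simpa using hv)
        · have hf : (a == b) = false := by simp [hab]
          simp only [hf, Bool.false_eq_true, if_false]
          constructor
          · intro h; exact absurd h (by omega)
          · intro h
            rw [List.cons.injEq] at h
            exact absurd h.1 hab

-- all chunks at multiples of dN equal the first chunk, from the shift equation
theorem chunk_of_shift (t : List String) (dN : Nat) (hd : 1 ≤ dN)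
    (hS : t.drop dN = t.take (t.length - dN)) :
    ∀ q, dN * q + dN ≤ t.length → (t.drop (dN * q)).take dN = t.take dN := by
  intro q
  induction q with
  | zero => intro _; simp
  | succ q ih =>
    intro hq
    have hql : dN * (q + 1) = dN * q + dN := by ring
    rw [hql] at hq ⊢
    have h1 : t.drop (dN * q + dN) = (t.drop (dN * q)).take (t.length - dN - dN * q) := by
      have e1 : (t.drop dN).drop (dN * q) = t.drop (dN * q + dN) := by
        rw [List.drop_drop, Nat.add_comm]
      rw [← e1, hS, List.drop_take]
    rw [h1, List.take_take]
    have hmin : min dN (t.length - dN - dN * q) = dN := by omega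
    rw [hmin]
    exact ih (by omega)

-- A's chunk-by-chunk scan is the one-shift condition, for divisor periods
theorem isRepeatingA_eq_shift (t : List String) (dN : Nat) (hd : 1 ≤ dN) (hdvd : dN ∣ t.length) :
    isRepeatingA t (dN : Int) = decide (t.drop dN = t.take (t.length - dN)) := by
  obtain ⟨e, he⟩ := hdvd
  unfold isRepeatingA
  rw [Bool.eq_iff_iff]
  simp only [List.all_eq_true, decide_eq_true_eq, beq_iff_eq]
  constructor
  · intro hall
    apply List.ext_getElem
    · simp [List.length_take, List.length_drop]
    · intro k hk1 hk2
      have hkL : k < t.length - dN := by simpa using hk2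
      have hchunk : ∀ mN : Nat, dN ∣ mN → mN + dN ≤ t.length →
          (t.drop mN).take dN = t.take dN := by
        intro mN hm hmt
        have hmem : (mN : Int) ∈ PySem.List.pyRange 0 (t.length : Int) (dN : Int) := by
          rw [PySem.List.mem_pyRange_iff_of_pos (by exact_mod_cast hd)]
          refine ⟨by positivity, by exact_mod_cast (by omega : mN < t.length), ?_⟩
          simpa using Int.natCast_dvd_natCast.mpr hm
        have := hall _ hmem
        rw [show (mN : Int) + (dN : Int) = ((mN + dN : Nat) : Int) by push_cast; ring] at this
        rw [PySem.List.slice_natCast, PySem.List.slice_to_natCast] at this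
        simpa using this
      have hk : dN * (k / dN) + k % dN = k := Nat.div_add_mod k dN
      set q := k / dN with hqdef
      set r := k % dN with hrdef
      have hr : r < dN := Nat.mod_lt _ (by omega)
      have hq1 : dN * q + dN ≤ t.length := by omega
      have hlt : dN * (q + 1) < dN * e := by
        have hx : dN * (q + 1) = dN * q + dN := by ring
        omega
      have hqe : q + 1 < e := Nat.lt_of_mul_lt_mul_left hlt
      have hmul : dN * (q + 2) ≤ dN * e := Nat.mul_le_mul_left dN (by omega)
      have hq2 : (dN * q + dN) + dN ≤ t.length := by
        have hx : dN * (q + 2) = dN * q + dN + dN := by ring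
        omega
      have hc1 := hchunk (dN * q) ⟨q, rfl⟩ hq1
      have hc2 := hchunk (dN * q + dN) ⟨q + 1, by ring⟩ hq2
      have idxeq : ∀ (i1 i2 : Nat) (h1 : i1 < t.length) (h2 : i2 < t.length),
          i1 = i2 → t[i1] = t[i2] := by
        intro i1 i2 h1 h2 h
        subst h
        rfl
      have key : ∀ (m : Nat), m + dN ≤ t.length → (t.drop m).take dN = t.take dN →
          ∀ (hmr : m + r < t.length) (hrl : r < t.length), t[m + r]'hmr = t[r]'hrl := by
        intro m hm hchunkeq hmr hrl
        have h1 : ((t.drop m).take dN)[r]'(by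
            simp [List.length_take, List.length_drop]; omega) = t[m + r]'(by omega) := by
          simp [List.getElem_take, List.getElem_drop]
        have h2 : (t.take dN)[r]'(by simp [List.length_take]; omega) = t[r]'(by omega) := by
          simp [List.getElem_take]
        calc t[m + r]'hmr = ((t.drop m).take dN)[r]'(by
              simp [List.length_take, List.length_drop]; omega) := h1.symm
          _ = (t.take dN)[r]'(by simp [List.length_take]; omega) :=
              List.getElem_of_eq hchunkeq _
          _ = t[r]'hrl := h2
      have goal1 : (t.drop dN)[k]'hk1 = t[dN + k]'(by omega) := by
        simp [List.getElem_drop]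
      have goal2 : (t.take (t.length - dN))[k]'hk2 = t[k]'(by omega) := by
        simp [List.getElem_take]
      rw [goal1, goal2]
      have e2 : t[dN + k]'(by omega) = t[(dN * q + dN) + r]'(by omega) :=
        idxeq _ _ (by omega) (by omega) (by omega)
      have e3 : t[(dN * q + dN) + r]'(by omega) = t[r]'(by omega) :=
        key (dN * q + dN) hq2 hc2 (by omega) (by omega)
      have e4 : t[k]'(by omega) = t[dN * q + r]'(by omega) :=
        idxeq _ _ (by omega) (by omega) (by omega)
      have e5 : t[dN * q + r]'(by omega) = t[r]'(by omega) :=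
        key (dN * q) hq1 hc1 (by omega) (by omega)
      rw [e2, e3, e4, e5]
  · intro hS x hx
    rw [PySem.List.mem_pyRange_iff_of_pos (by exact_mod_cast hd)] at hx
    obtain ⟨hx0, hxL, hxdvd⟩ := hx
    obtain ⟨xN, rfl⟩ := Int.eq_ofNat_of_zero_le hx0
    have hxN : xN < t.length := by exact_mod_cast hxL
    have hxdvdN : dN ∣ xN := by
      have : (dN : Int) ∣ (xN : Int) := by simpa using hxdvd
      exact_mod_cast this
    obtain ⟨q, rfl⟩ := hxdvdN
    rw [show ((dN * q : Nat) : Int) + (dN : Int) = ((dN * q + dN : Nat) : Int) by push_cast; ring]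
    rw [PySem.List.slice_natCast, PySem.List.slice_to_natCast]
    have hle : dN * q + dN ≤ t.length := by
      have hqe : q < e := by
        rcases Nat.lt_or_ge q e with h | h
        · exact h
        · exfalso
          have : dN * e ≤ dN * q := Nat.mul_le_mul_left dN h
          omega
      have h5 : q + 1 ≤ e := hqe
      have h6 : dN * (q + 1) ≤ dN * e := Nat.mul_le_mul_left dN h5
      nlinarith
    have := chunk_of_shift t dN hd hS q hle
    simpa using this

theorem findSome?_congr {α β : Type} (l : List α) (f g : α → Option β)
    (h : ∀ x ∈ l, f x = g x) : l.findSome? f = l.findSome? g := by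
  induction l with
  | nil => rfl
  | cons a l ih =>
    rw [List.findSome?_cons, List.findSome?_cons, h a (by simp)]
    cases g a with
    | some v => rfl
    | none => exact ih (fun x hx => h x (by simp [hx]))

-- the trimmed slice strings[i if i>0 else None : -j if j>0 else None]
theorem cellT (s : List String) (iN jN : Nat) (him : iN < s.length) (hjm : jN < s.length) :
    PySem.List.slice s (if 0 < (iN : Int) then some (iN : Int) else none)
        (if 0 < (jN : Int) then some (-(jN : Int)) else none)
      = (s.drop iN).take (s.length - jN - iN) := by
  by_cases hi : 0 < iN
  · by_cases hj : 0 < jN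
    · rw [if_pos (by exact_mod_cast hi), if_pos (by exact_mod_cast hj)]
      show List.take (PySem.List.clampIdx s.length (-(jN : Int)) -
          PySem.List.clampIdx s.length (iN : Int))
          (List.drop (PySem.List.clampIdx s.length (iN : Int)) s) = _
      rw [PySem.List.clampIdx_neg_natCast (n := s.length) (k := jN) hj]
      have : PySem.List.clampIdx s.length (iN : Int) = iN := by
        simp
        omega
      rw [this]
    · have hj0 : jN = 0 := by omega
      subst hj0
      rw [if_pos (by exact_mod_cast hi), if_neg (by simp)]
      rw [PySem.List.slice_from_natCast]
      rw [List.take_of_length_le (by simp)]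
  · have hi0 : iN = 0 := by omega
    subst hi0
    rw [if_neg (by simp)]
    by_cases hj : 0 < jN
    · rw [if_pos (by exact_mod_cast hj)]
      rw [PySem.List.slice_to_neg_natCast (xs := s) (k := jN) hj]
      simp
    · have hj0 : jN = 0 := by omega
      subst hj0
      rw [if_neg (by simp)]
      rw [PySem.List.slice_none_none]
      simp

-- attaching the found (i, j) commutes with the first-hit search
theorem findSome?_attach {α : Type} (l : List α) (f : α → Option (List String × Int))
    (g : α → Option (List String × Int × Int × Int)) (i j : Int)
    (h : ∀ x ∈ l, (match f x with
      | some (part, times) => some (part, times, i, j)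
      | none => none) = g x) :
    (match l.findSome? f with
     | some (part, times) => some (part, times, i, j)
     | none => none) = l.findSome? g := by
  induction l with
  | nil => rfl
  | cons a l ih =>
    rw [List.findSome?_cons, List.findSome?_cons, ← h a (by simp)]
    cases f a with
    | some v => obtain ⟨p, t⟩ := v; rfl
    | none => exact ih (fun x hx => h x (by simp [hx]))

-- the two searches return the same (part, times) at every trimming (i, j)
theorem cellEqPair (s : List String) (iN jN : Nat) (him : iN < s.length) (hjm : jN < s.length) :
    getRepeatingA (PySem.List.slice s
        (if 0 < (iN : Int) then some (iN : Int) else none)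
        (if 0 < (jN : Int) then some (-(jN : Int)) else none))
    = (PySem.List.pyRange 1
        (PySem.Int.floordiv ((s.length : Int) - (jN : Int) - (iN : Int)) 2 + 1) 1).findSome?
        (fun d =>
          if PySem.Int.mod ((s.length : Int) - (jN : Int) - (iN : Int)) d == 0 &&
              decide ((s.length : Int) - (jN : Int) - (iN : Int) - d ≤
                ((((zRowsB s).getD (iN : Int).toNat []).getD (d - 1).toNat 0 : Nat) : Int)) then
            some (PySem.List.slice s (some (iN : Int)) (some ((iN : Int) + d)),
              PySem.Int.floordiv ((s.length : Int) - (jN : Int) - (iN : Int)) d)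
          else none) := by
  set mN := s.length with hmN
  set c : Nat := mN - jN - iN with hc
  have hT := cellT s iN jN him hjm
  rw [hT]
  have htlen : ((s.drop iN).take (mN - jN - iN)).length = c := by
    simp [List.length_take, List.length_drop]
    omega
  by_cases hc2 : 2 ≤ c
  · -- the trimmed piece is long enough; both searches scan d = 1 .. c/2
    have hLc : (mN : Int) - (jN : Int) - (iN : Int) = (c : Int) := by
      have : iN + jN + c = mN := by omega
      omega
    rw [hLc]
    unfold getRepeatingA
    rw [htlen]
    apply findSome?_congr
    intro d hd
    rw [PySem.List.mem_pyRange_one] at hd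
    obtain ⟨hd1, hd2⟩ := hd
    obtain ⟨dN, rfl⟩ := Int.eq_ofNat_of_zero_le (by omega : (0:Int) ≤ d)
    have hdN1 : 1 ≤ dN := by exact_mod_cast hd1
    have hdN2 : 2 * dN ≤ c := by
      have h2d : (dN : Int) ≤ PySem.Int.floordiv (c : Int) 2 := by omega
      rw [PySem.Int.le_floordiv_iff_mul_le (by norm_num)] at h2d
      omega
    by_cases hdvd : dN ∣ c
    · have hmod : (PySem.Int.mod (c : Int) (dN : Int) == 0) = true := by
        rw [beq_iff_eq, PySem.Int.mod_eq_zero_iff_dvd]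
        exact_mod_cast hdvd
      have hdvd' : dN ∣ ((s.drop iN).take (mN - jN - iN)).length := by rw [htlen]; exact hdvd
      rw [hmod]
      simp only [if_true, Bool.true_and]
      rw [isRepeatingA_eq_shift _ dN hdN1 hdvd', htlen]
      -- identify the two conditions
      have hcm : c ≤ mN - iN := by omega
      have hshift : ((s.drop iN).take (mN - jN - iN)).drop dN
            = ((s.drop iN).take (mN - jN - iN)).take (c - dN) ↔
          (c - dN ≤ lcpLen (s.drop iN) (s.drop (iN + dN))) := by
        have hcc : mN - jN - iN = c := by omega
        rw [hcc]
        have e1 : ((s.drop iN).take c).drop dN = (s.drop (iN + dN)).take (c - dN) := by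
          rw [List.drop_take, List.drop_drop]
        have e2 : ((s.drop iN).take c).take (c - dN) = (s.drop iN).take (c - dN) := by
          rw [List.take_take, Nat.min_def]
          split
          · rfl
          · omega
        rw [e1, e2]
        rw [lcpLen_ge_iff (c - dN) (s.drop iN) (s.drop (iN + dN)) (by simp; omega) (by simp; omega)]
        constructor
        · intro h; exact h.symm
        · intro h; exact h.symm
      have hlook : ((((zRowsB s).getD (iN : Int).toNat []).getD (((dN : Int) - 1).toNat) 0) : Nat)
          = lcpLen (s.drop iN) (s.drop (iN + dN)) := by
        have hiNt : ((iN : Int)).toNat = iN := by simp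
        rw [hiNt]
        have hdm : ((dN : Int) - 1).toNat = dN - 1 := by omega
        rw [hdm]
        rw [zRowsB_spec s iN (dN - 1)]
        congr 2
        omega
      by_cases hS : ((s.drop iN).take (mN - jN - iN)).drop dN
          = ((s.drop iN).take (mN - jN - iN)).take (c - dN)
      · have hci : (c : Int) - (dN : Int) ≤
            ((((zRowsB s).getD (iN : Int).toNat []).getD (((dN : Int) - 1).toNat) 0 : Nat) : Int) := by
          rw [hlook]
          have := hshift.mp hS
          omega
        rw [if_pos (by simpa using hS), if_pos (by simpa using hci)]
        -- the returned values agree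
        have hv1 : PySem.List.slice ((s.drop iN).take (mN - jN - iN)) none (some (dN : Int))
            = PySem.List.slice s (some (iN : Int)) (some ((iN : Int) + (dN : Int))) := by
          rw [PySem.List.slice_to_natCast]
          rw [show (iN : Int) + (dN : Int) = ((iN + dN : Nat) : Int) by push_cast; ring]
          rw [PySem.List.slice_natCast]
          rw [List.take_take, Nat.min_def]
          have hid : iN + dN - iN = dN := by omega
          rw [hid]
          split
          · rfl
          · omega
        rw [hv1]
      · have hci : ¬ ((c : Int) - (dN : Int) ≤
            ((((zRowsB s).getD (iN : Int).toNat []).getD (((dN : Int) - 1).toNat) 0 : Nat) : Int)) := by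
          rw [hlook]
          intro hcon
          exact hS (hshift.mpr (by omega))
        rw [if_neg (by simpa using hS), if_neg (by simpa using hci)]
    · have hmod : (PySem.Int.mod (c : Int) (dN : Int) == 0) = false := by
        rw [beq_eq_false_iff_ne]
        rw [Ne, PySem.Int.mod_eq_zero_iff_dvd]
        intro hcon
        exact hdvd (by exact_mod_cast hcon)
      rw [hmod]
      simp
  · -- trimmed piece shorter than 2: both ranges are empty, both searches find nothing
    have h1 : PySem.Int.floordiv ((c : Int)) 2 + 1 ≤ 1 := by
      have : PySem.Int.floordiv ((c : Int)) 2 < 1 := by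
        rw [PySem.Int.floordiv_lt_iff_lt_mul (by norm_num)]
        omega
      omega
    have h2 : PySem.Int.floordiv ((mN : Int) - (jN : Int) - (iN : Int)) 2 + 1 ≤ 1 := by
      have : PySem.Int.floordiv ((mN : Int) - (jN : Int) - (iN : Int)) 2 < 1 := by
        rw [PySem.Int.floordiv_lt_iff_lt_mul (by norm_num)]
        omega
      omega
    unfold getRepeatingA
    rw [htlen]
    rw [show ((c : Int)) = ((((s.drop iN).take (mN - jN - iN)).length : Nat) : Int) by rw [htlen]]
    rw [PySem.List.pyRange_one_eq_nil (by rw [htlen]; exact h1), PySem.List.pyRange_one_eq_nil h2]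
    rfl

-- the two searches agree
theorem findEq (s : List String) : findRepeatingA s = findRepB s := by
  unfold findRepeatingA findRepB
  apply findSome?_congr
  intro i hi
  rw [PySem.List.mem_pyRange_one] at hi
  apply findSome?_congr
  intro j hj
  rw [PySem.List.mem_pyRange_one] at hj
  obtain ⟨iN, rfl⟩ := Int.eq_ofNat_of_zero_le hi.1
  obtain ⟨jN, rfl⟩ := Int.eq_ofNat_of_zero_le hj.1
  rw [cellEqPair s iN jN (by exact_mod_cast hi.2) (by exact_mod_cast hj.2)]
  apply findSome?_attach
  intro d _
  by_cases hcond : (PySem.Int.mod ((s.length : Int) - (jN : Int) - (iN : Int)) d == 0 &&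
      decide ((s.length : Int) - (jN : Int) - (iN : Int) - d ≤
        ((((zRowsB s).getD (iN : Int).toNat []).getD (d - 1).toNat 0 : Nat) : Int))) = true
  · rw [if_pos hcond, if_pos hcond]
  · rw [if_neg hcond, if_neg hcond]

theorem tailEq (lines : List String) (skip : Int) (acc : List (List String × Int)) :
    tailA lines skip acc = acc ++ tailB lines skip := by
  unfold tailA tailB
  split <;> simp

theorem loopEq (lines : List String) :
    ∀ (fuel : Nat) (skip : Int) (acc : List (List String × Int)),
      loopA lines fuel skip acc = acc ++ restB lines fuel skip := by
  intro fuel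
  induction fuel with
  | zero => intro skip acc; exact tailEq lines skip acc
  | succ n ih =>
      intro skip acc
      unfold loopA restB
      rw [findEq]
      split
      · cases h : findRepB (PySem.List.slice lines (some skip) none) with
        | none => exact tailEq lines skip acc
        | some v =>
            obtain ⟨part, times, i, j⟩ := v
            simp [ih, List.append_assoc]
      · exact tailEq lines skip acc

-- ===== VERDICT (by name: the statement is the Claim_ definition above) =====
theorem compile_merges_spec : Claim_equal_compile_merges := by
  intro lines _
  unfold Spec_compile_merges compile_merges compile_merges_alt
  simpa using loopEq lines (lines.length + 1) 0 []
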